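-- pv_equiv track=rewrite | github.com/Apoorva2597/Breast_Restore | make_fn_deid_bundles.py | pick_default_pid_col
-- ===== SOURCE A (Python) =====
-- def pick_default_pid_col(df_cols):
--     """
--     Choose the most likely ID column that matches your PATIENT_BUNDLES / de-id exporter.
--     Prefer ENCRYPTED_PAT_ID or PatientID (seen in your screenshots) over MRN/patient_id.
--     """
--     priority = [
--         "ENCRYPTED_PAT_ID", "ENCRYPTED_PATID", "ENCRYPTED_PATIENT_ID",
--         "PatientID", "PATIENTID",
--         "patient_id", "PATIENT_ID",
--         "MRN", "mrn",
--     ]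
--     for c in priority:
--         if c in df_cols:
--             return c
--     return None
-- ===== SOURCE B (Python) =====
-- def pick_default_pid_col(df_cols):
--     """
--     Choose the most likely ID column that matches your PATIENT_BUNDLES / de-id exporter.
--     Prefer ENCRYPTED_PAT_ID or PatientID (seen in your screenshots) over MRN/patient_id.
--     """
--     priority = [
--         "ENCRYPTED_PAT_ID", "ENCRYPTED_PATID", "ENCRYPTED_PATIENT_ID",
--         "PatientID", "PATIENTID",
--         "patient_id", "PATIENT_ID",
--         "MRN", "mrn",
--     ]
--     rank = {name: i for i, name in enumerate(priority)}
--     best = None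
--     for c in df_cols:
--         r = rank.get(c)
--         if r is not None and (best is None or r < best[0]):
--             best = (r, c)
--     return best[1] if best is not None else None
-- ===== Notes on version B (the rewrite author's own statement) =====
-- stated objective: alternative
-- what changed: Instead of short-circuiting down the fixed priority list with a membership test per name, B builds a name->rank dict once and makes a single pass over df_cols keeping the lowest-ranked column seen.
import Mathlib
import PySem

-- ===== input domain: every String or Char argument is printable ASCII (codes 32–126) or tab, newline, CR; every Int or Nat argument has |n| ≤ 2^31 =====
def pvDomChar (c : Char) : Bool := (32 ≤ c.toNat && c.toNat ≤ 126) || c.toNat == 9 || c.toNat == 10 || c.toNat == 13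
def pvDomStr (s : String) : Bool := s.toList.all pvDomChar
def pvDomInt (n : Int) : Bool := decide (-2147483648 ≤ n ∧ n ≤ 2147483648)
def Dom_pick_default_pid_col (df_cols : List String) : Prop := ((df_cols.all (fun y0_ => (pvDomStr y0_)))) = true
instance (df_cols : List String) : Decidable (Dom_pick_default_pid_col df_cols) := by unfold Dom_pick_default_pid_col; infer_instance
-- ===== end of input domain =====

-- B replaces A's short-circuit scan down the fixed priority list by a name->rank dict built
-- once plus a single lowest-rank-candidate pass over df_cols (alternative decomposition).

-- ===== PORT A =====
def pvPriorityA : List String :=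
  ["ENCRYPTED_PAT_ID", "ENCRYPTED_PATID", "ENCRYPTED_PATIENT_ID",
   "PatientID", "PATIENTID",
   "patient_id", "PATIENT_ID",
   "MRN", "mrn"]

def pvPickLoopA (df_cols : List String) : List String → Option String
  | [] => none
  | c :: rest => if df_cols.contains c then some c else pvPickLoopA df_cols rest

def pick_default_pid_col (df_cols : List String) : Option String :=
  pvPickLoopA df_cols pvPriorityA

-- ===== PORT B =====
def pvPriorityB : List String :=
  ["ENCRYPTED_PAT_ID", "ENCRYPTED_PATID", "ENCRYPTED_PATIENT_ID",
   "PatientID", "PATIENTID",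
   "patient_id", "PATIENT_ID",
   "MRN", "mrn"]

-- rank = {name: i for i, name in enumerate(priority)}
def pvRankB : PySem.Dict String Int :=
  (PySem.List.enumerate pvPriorityB).foldl (fun d p => d.insert p.2 p.1) PySem.Dict.empty

-- one iteration of B's loop body: keep the lowest-ranked candidate seen so far
def pvStepB (best : Option (Int × String)) (c : String) : Option (Int × String) :=
  match pvRankB.get? c with
  | none => best
  | some r =>
    match best with
    | none => some (r, c)
    | some b => if r < b.1 then some (r, c) else best

def pick_default_pid_col_alt (df_cols : List String) : Option String :=
  match df_cols.foldl pvStepB none with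
  | some b => some b.2
  | none => none

-- ===== PRECONDITION & SPEC =====
def Spec_pick_default_pid_col (df_cols : List String) (out : Option String) : Prop := out = pick_default_pid_col_alt df_cols
instance (df_cols : List String) (out : Option String) : Decidable (Spec_pick_default_pid_col df_cols out) := by unfold Spec_pick_default_pid_col; infer_instance

-- ===== CLAIM (what is proved, stated in full; the proofs are below) =====
def Claim_equal_pick_default_pid_col : Prop := ∀ (df_cols : List String), Dom_pick_default_pid_col df_cols → Spec_pick_default_pid_col df_cols (pick_default_pid_col df_cols)

-- ===== LEMMAS AND PROOFS =====

-- 'min with left bias' merge of two candidates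
def pvMerge : Option (Int × String) → Option (Int × String) → Option (Int × String)
  | none, b => b
  | some a, none => some a
  | some a, some b => if b.1 < a.1 then some b else some a

theorem pvMerge_assoc (a b c : Option (Int × String)) :
    pvMerge (pvMerge a b) c = pvMerge a (pvMerge b c) := by
  rcases a with _|x <;> rcases b with _|y <;> rcases c with _|z
  · rfl
  · rfl
  · rfl
  · rfl
  · rfl
  · simp [pvMerge]
  · by_cases h1 : y.1 < x.1 <;> simp [pvMerge, h1]
  · by_cases h1 : y.1 < x.1 <;> by_cases h2 : z.1 < y.1 <;> by_cases h3 : z.1 < x.1 <;>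
      simp [pvMerge, h1, h2, h3] <;> omega

theorem pvStep_eq_merge (acc : Option (Int × String)) (c : String) :
    pvStepB acc c = pvMerge acc (pvStepB none c) := by
  unfold pvStepB pvMerge
  cases h : pvRankB.get? c <;> cases acc <;> simp

theorem pvFold_acc (cs : List String) : ∀ acc : Option (Int × String),
    cs.foldl pvStepB acc = pvMerge acc (cs.foldl pvStepB none) := by
  induction cs with
  | nil => intro acc; cases acc <;> simp [pvMerge]
  | cons x xs ih =>
    intro acc
    simp only [List.foldl_cons]
    rw [ih (pvStepB acc x), ih (pvStepB none x), pvStep_eq_merge acc x, pvMerge_assoc]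

-- the rank dict, as a chain of lookups (peeled insert by insert, last insert first)
theorem pvRank_get (c : String) :
    pvRankB.get? c =
      if c = "mrn" then some 8
      else if c = "MRN" then some 7
      else if c = "PATIENT_ID" then some 6
      else if c = "patient_id" then some 5
      else if c = "PATIENTID" then some 4
      else if c = "PatientID" then some 3
      else if c = "ENCRYPTED_PATIENT_ID" then some 2
      else if c = "ENCRYPTED_PATID" then some 1
      else if c = "ENCRYPTED_PAT_ID" then some 0
      else none := by
  simp only [pvRankB, pvPriorityB, PySem.List.enumerate_cons, PySem.List.enumerate_nil,
    List.foldl_cons, List.foldl_nil]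
  norm_num [PySem.Dict.get?_insert, PySem.Dict.get?_empty]

-- nested-if characterisation of what both programs compute
def pvSpec (cols : List String) : Option (Int × String) :=
  if cols.contains "ENCRYPTED_PAT_ID" then some (0, "ENCRYPTED_PAT_ID")
  else if cols.contains "ENCRYPTED_PATID" then some (1, "ENCRYPTED_PATID")
  else if cols.contains "ENCRYPTED_PATIENT_ID" then some (2, "ENCRYPTED_PATIENT_ID")
  else if cols.contains "PatientID" then some (3, "PatientID")
  else if cols.contains "PATIENTID" then some (4, "PATIENTID")
  else if cols.contains "patient_id" then some (5, "patient_id")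
  else if cols.contains "PATIENT_ID" then some (6, "PATIENT_ID")
  else if cols.contains "MRN" then some (7, "MRN")
  else if cols.contains "mrn" then some (8, "mrn")
  else none

set_option maxHeartbeats 2000000 in
theorem pvB0_spec (cols : List String) : cols.foldl pvStepB none = pvSpec cols := by
  induction cols with
  | nil => simp [pvSpec]
  | cons c cs ih =>
    simp only [List.foldl_cons]
    rw [pvFold_acc cs (pvStepB none c), ih]
    unfold pvStepB
    rw [pvRank_get c]
    by_cases hc0 : c = "ENCRYPTED_PAT_ID"
    · subst hc0; simp [pvSpec, pvMerge]; split_ifs <;> simp [pvMerge]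
    by_cases hc1 : c = "ENCRYPTED_PATID"
    · subst hc1; simp [pvSpec, pvMerge]; split_ifs <;> simp [pvMerge]
    by_cases hc2 : c = "ENCRYPTED_PATIENT_ID"
    · subst hc2; simp [pvSpec, pvMerge]; split_ifs <;> simp [pvMerge]
    by_cases hc3 : c = "PatientID"
    · subst hc3; simp [pvSpec, pvMerge]; split_ifs <;> simp [pvMerge]
    by_cases hc4 : c = "PATIENTID"
    · subst hc4; simp [pvSpec, pvMerge]; split_ifs <;> simp [pvMerge]
    by_cases hc5 : c = "patient_id"
    · subst hc5; simp [pvSpec, pvMerge]; split_ifs <;> simp [pvMerge]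
    by_cases hc6 : c = "PATIENT_ID"
    · subst hc6; simp [pvSpec, pvMerge]; split_ifs <;> simp [pvMerge]
    by_cases hc7 : c = "MRN"
    · subst hc7; simp [pvSpec, pvMerge]; split_ifs <;> simp [pvMerge]
    by_cases hc8 : c = "mrn"
    · subst hc8; simp [pvSpec, pvMerge]; split_ifs <;> simp [pvMerge]
    · simp [pvSpec, pvMerge, hc0, hc1, hc2, hc3, hc4, hc5, hc6, hc7, hc8, Ne.symm]

theorem pvA_spec (cols : List String) :
    pick_default_pid_col cols = (pvSpec cols).map (·.2) := by
  simp only [pick_default_pid_col, pvPriorityA, pvPickLoopA, pvSpec]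
  split_ifs <;> simp_all

-- ===== VERDICT (by name: the statement is the Claim_ definition above) =====
theorem pick_default_pid_col_spec : Claim_equal_pick_default_pid_col := by
  intro cols _
  unfold Spec_pick_default_pid_col pick_default_pid_col_alt
  rw [pvB0_spec cols, pvA_spec cols]
  cases pvSpec cols <;> rfl
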